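-- pv_equiv track=rewrite | github.com/ShashwatSolanki/finmate | backend/app/ml/finmate.py | _last_brace_object_span
-- ===== SOURCE A (Python) =====
-- def _last_brace_object_span(s: str) -> tuple[int, int] | None:
--     start = s.rfind("{")
--     if start < 0:
--         return None
--     depth = 0
--     for i in range(start, len(s)):
--         if s[i] == "{":
--             depth += 1
--         elif s[i] == "}":
--             depth -= 1
--             if depth == 0:
--                 return (start, i + 1)
--     return None
-- ===== SOURCE B (Python) =====
-- def _last_brace_object_span(s: str) -> tuple[int, int] | None:
--     start = s.rfind("{")
--     if start < 0:
--         return None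
--     end = s.find("}", start)
--     if end < 0:
--         return None
--     return (start, end + 1)
-- ===== Notes on version B (the rewrite author's own statement) =====
-- stated objective: simpler
-- what changed: Replaces the explicit depth-counting scan loop with two direct string searches: since rfind returns the LAST '{', depth can never exceed one, so the span ends at the first '}' after it (s.find('}', start)).
import Mathlib
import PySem

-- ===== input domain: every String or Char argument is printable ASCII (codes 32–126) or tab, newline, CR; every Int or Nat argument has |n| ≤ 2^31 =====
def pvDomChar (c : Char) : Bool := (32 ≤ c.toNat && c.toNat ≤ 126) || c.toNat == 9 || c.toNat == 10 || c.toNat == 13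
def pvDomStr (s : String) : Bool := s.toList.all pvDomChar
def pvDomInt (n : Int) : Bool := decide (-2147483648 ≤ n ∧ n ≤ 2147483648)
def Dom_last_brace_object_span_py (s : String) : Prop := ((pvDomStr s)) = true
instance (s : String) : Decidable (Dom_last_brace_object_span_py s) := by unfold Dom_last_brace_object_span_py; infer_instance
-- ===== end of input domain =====

-- B replaces A's depth-counting scan after the last '{' with two direct searches
-- (rfind then find): since no '{' follows, the span ends at the first '}' after it.

-- ===== PORT A =====
-- the 'for i in range(start, len(s))' loop with its depth counter and early return
def pvA_loop (cs : List Char) (start : Int) (depth : Int) : List Int → Option (Int × Int)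
  | [] => none
  | i :: rest =>
    if PySem.List.pyGetD cs i ' ' = '{' then
      pvA_loop cs start (depth + 1) rest
    else if PySem.List.pyGetD cs i ' ' = '}' then
      if depth - 1 = 0 then some (start, i + 1)
      else pvA_loop cs start (depth - 1) rest
    else pvA_loop cs start depth rest

def last_brace_object_span_py (s : String) : Option (Int × Int) :=
  let start := PySem.Str.rfind s "{"
  if start < 0 then none
  else pvA_loop s.toList start 0 (PySem.List.pyRange start (PySem.Str.len s) 1)

-- ===== PORT B =====
def last_brace_object_span_py_alt (s : String) : Option (Int × Int) :=
  let start := PySem.Str.rfind s "{"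
  if start < 0 then none
  else
    let e := PySem.Str.findFrom s "}" start none
    if e < 0 then none else some (start, e + 1)

-- ===== PRECONDITION & SPEC =====
def Spec_last_brace_object_span_py (s : String) (out : Option (Int × Int)) : Prop := out = last_brace_object_span_py_alt s
instance (s : String) (out : Option (Int × Int)) : Decidable (Spec_last_brace_object_span_py s out) := by unfold Spec_last_brace_object_span_py; infer_instance

-- ===== CLAIM (what is proved, stated in full; the proofs are below) =====
def Claim_equal_last_brace_object_span_py : Prop := ∀ (s : String), Dom_last_brace_object_span_py s → Spec_last_brace_object_span_py s (last_brace_object_span_py s)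

-- ===== LEMMAS AND PROOFS =====

-- [c] is a prefix of l iff l starts with c
theorem pv_singleton_isPrefixOf {c : Char} {l : List Char} :
    ([c].isPrefixOf l = true) ↔ l.head? = some c := by
  rw [List.isPrefixOf_iff_prefix]
  cases l with
  | nil => simp
  | cons a t => simp [List.cons_prefix_cons, eq_comm]

theorem pv_singleton_isPrefixOf_drop {c : Char} {cs : List Char} {j : Nat} :
    ([c].isPrefixOf (cs.drop j) = true) ↔ cs[j]? = some c := by
  rw [pv_singleton_isPrefixOf, List.head?_drop]

-- characterisation of rfind.go for a single-character needle
theorem pv_rfind_go_spec (cs : List Char) (c : Char) (k : Nat) :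
    (PySem.Chars.rfind.go cs [c] k = -1 ∧ ∀ j : Nat, j ≤ k → cs[j]? ≠ some c) ∨
    (∃ j : Nat, PySem.Chars.rfind.go cs [c] k = (j : Int) ∧ cs[j]? = some c ∧
      ∀ m : Nat, j < m → m ≤ k → cs[m]? ≠ some c) := by
  induction k with
  | zero =>
    by_cases h : cs[0]? = some c
    · right
      refine ⟨0, ?_, h, fun m hm hm' => absurd (Nat.lt_of_lt_of_le hm hm') (by omega)⟩
      have hp : [c].isPrefixOf (cs.drop 0) = true := pv_singleton_isPrefixOf_drop.mpr h
      rw [List.drop_zero] at hp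
      simp only [PySem.Chars.rfind.go]
      rw [if_pos hp]
      norm_num
    · left
      refine ⟨?_, fun j hj => Nat.le_zero.mp hj ▸ h⟩
      simp only [PySem.Chars.rfind.go]
      rw [if_neg]
      intro hpref
      exact h (pv_singleton_isPrefixOf_drop.mp hpref)
  | succ n ih =>
    by_cases h : cs[n+1]? = some c
    · right
      refine ⟨n+1, ?_, h, fun m hm hm' => absurd hm' (by omega)⟩
      have hp : [c].isPrefixOf (cs.drop (n+1)) = true := pv_singleton_isPrefixOf_drop.mpr h
      simp only [PySem.Chars.rfind.go, hp, if_true]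
    · have hgo : PySem.Chars.rfind.go cs [c] (n+1) = PySem.Chars.rfind.go cs [c] n := by
        simp only [PySem.Chars.rfind.go]
        rw [if_neg]
        intro hpref
        exact h (pv_singleton_isPrefixOf_drop.mp hpref)
      rcases ih with ⟨h1, h2⟩ | ⟨j, hj1, hj2, hj3⟩
      · left
        refine ⟨hgo ▸ h1, fun j hj => ?_⟩
        rcases Nat.lt_or_ge j (n+1) with hlt | hge
        · exact h2 j (by omega)
        · have : j = n + 1 := by omega
          exact this ▸ h
      · right
        refine ⟨j, hgo ▸ hj1, hj2, fun m hm hm' => ?_⟩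
        rcases Nat.lt_or_ge m (n+1) with hlt | hge
        · exact hj3 m hm (by omega)
        · have : m = n + 1 := by omega
          exact this ▸ h

-- characterisation of rfind for a single-character needle
theorem pv_rfind_char_spec (cs : List Char) (c : Char) :
    (PySem.Chars.rfind cs [c] = -1 ∧ ∀ j : Nat, cs[j]? ≠ some c) ∨
    (∃ j : Nat, PySem.Chars.rfind cs [c] = (j : Int) ∧ cs[j]? = some c ∧
      ∀ m : Nat, j < m → cs[m]? ≠ some c) := by
  rcases pv_rfind_go_spec cs c cs.length with ⟨h1, h2⟩ | ⟨j, hj1, hj2, hj3⟩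
  · left
    refine ⟨h1, fun j => ?_⟩
    rcases Nat.lt_or_ge j cs.length with hlt | hge
    · exact h2 j (by omega)
    · simp [List.getElem?_eq_none hge]
  · right
    refine ⟨j, hj1, hj2, fun m hm => ?_⟩
    rcases Nat.lt_or_ge m cs.length with hlt | hge
    · exact hj3 m hm (by omega)
    · simp [List.getElem?_eq_none hge]

-- shift of the running index in find.go (nonempty needle)
theorem pv_find_go_shift (sub t : List Char) (k : Nat) (hsub : sub ≠ []) :
    PySem.Chars.find.go sub t k =
      if PySem.Chars.find.go sub t 0 = -1 then -1 else (k : Int) + PySem.Chars.find.go sub t 0 := by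
  induction t generalizing k with
  | nil => simp [PySem.Chars.find.go, List.isEmpty_iff, hsub]
  | cons a t ih =>
    by_cases hp : sub.isPrefixOf (a :: t) = true
    · simp [PySem.Chars.find.go, hp]
    · simp only [PySem.Chars.find.go, hp, Bool.false_eq_true, if_false]
      rw [ih (k+1), ih 1]
      by_cases h0 : PySem.Chars.find.go sub t 0 = -1
      · simp [h0]
      · have := PySem.Chars.neg_one_le_find t sub
        simp only [PySem.Chars.find] at this
        rw [if_neg h0, if_neg (by omega), if_neg (by omega)]
        push_cast; ring

-- find on a cons whose head is not the (single-character) needle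
theorem pv_find_cons_of_ne {c d : Char} (t : List Char) (h : c ≠ d) :
    PySem.Chars.find (c :: t) [d] =
      if PySem.Chars.find t [d] = -1 then -1 else 1 + PySem.Chars.find t [d] := by
  have hp : ¬ [d].isPrefixOf (c :: t) = true := by
    rw [pv_singleton_isPrefixOf]
    simp only [List.head?_cons, Option.some.injEq]
    exact fun hdc => h hdc
  simp only [PySem.Chars.find, PySem.Chars.find.go, hp, Bool.false_eq_true, if_false]
  exact pv_find_go_shift [d] t 1 (by simp)

-- A's scan after the last '{' (depth already 1, no further '{') finds the first '}'
theorem pv_loopA_after (cs : List Char) (start : Int) (i : Nat)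
    (hno : ∀ j : Nat, i ≤ j → cs[j]? ≠ some '{') :
    pvA_loop cs start 1 (PySem.List.pyRange (i : Int) (cs.length : Int) 1) =
      if PySem.Chars.find (cs.drop i) ['}'] = -1 then none
      else some (start, (i : Int) + PySem.Chars.find (cs.drop i) ['}'] + 1) := by
  by_cases hlen : i < cs.length
  · rw [PySem.List.pyRange_one_cons (by exact_mod_cast hlen)]
    have hdrop : cs.drop i = cs[i] :: cs.drop (i+1) := List.drop_eq_getElem_cons hlen
    have hget : PySem.List.pyGetD cs (i : Int) ' ' = cs[i] := by
      rw [PySem.List.pyGetD_natCast, List.getD_eq_getElem?_getD, List.getElem?_eq_getElem hlen]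
      rfl
    have hnotbrace : ¬ PySem.List.pyGetD cs (i : Int) ' ' = '{' := by
      rw [hget]
      intro hc
      exact hno i (le_refl i) (by rw [List.getElem?_eq_getElem hlen, hc])
    by_cases hclose : cs[i] = '}'
    · -- first character scanned is '}': A returns here, find returns 0
      have hfind : PySem.Chars.find (cs.drop i) ['}'] = 0 := by
        rw [hdrop, hclose]
        simp [PySem.Chars.find, PySem.Chars.find.go, List.isPrefixOf]
      rw [show pvA_loop cs start 1 ((i : Int) :: PySem.List.pyRange ((i : Int) + 1) (cs.length : Int) 1) =
          if PySem.List.pyGetD cs (i : Int) ' ' = '{' then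
            pvA_loop cs start 2 (PySem.List.pyRange ((i : Int) + 1) (cs.length : Int) 1)
          else if PySem.List.pyGetD cs (i : Int) ' ' = '}' then
            if (1 : Int) - 1 = 0 then some (start, (i : Int) + 1)
            else pvA_loop cs start 0 (PySem.List.pyRange ((i : Int) + 1) (cs.length : Int) 1)
          else pvA_loop cs start 1 (PySem.List.pyRange ((i : Int) + 1) (cs.length : Int) 1) by
          simp [pvA_loop]]
      rw [if_neg hnotbrace, if_pos (by rw [hget]; exact hclose), if_pos (by norm_num),
        if_neg (by rw [hfind]; norm_num), hfind]
      norm_num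
    · -- neither brace: step to i+1
      have hnc : ¬ PySem.List.pyGetD cs (i : Int) ' ' = '}' := by rw [hget]; exact hclose
      rw [show pvA_loop cs start 1 ((i : Int) :: PySem.List.pyRange ((i : Int) + 1) (cs.length : Int) 1) =
          if PySem.List.pyGetD cs (i : Int) ' ' = '{' then
            pvA_loop cs start 2 (PySem.List.pyRange ((i : Int) + 1) (cs.length : Int) 1)
          else if PySem.List.pyGetD cs (i : Int) ' ' = '}' then
            if (1 : Int) - 1 = 0 then some (start, (i : Int) + 1)
            else pvA_loop cs start 0 (PySem.List.pyRange ((i : Int) + 1) (cs.length : Int) 1)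
          else pvA_loop cs start 1 (PySem.List.pyRange ((i : Int) + 1) (cs.length : Int) 1) by
          simp [pvA_loop]]
      rw [if_neg hnotbrace, if_neg hnc]
      have hstep : (i : Int) + 1 = ((i + 1 : Nat) : Int) := by push_cast; ring
      rw [hstep, pv_loopA_after cs start (i+1) (fun j hj => hno j (by omega))]
      rw [hdrop, pv_find_cons_of_ne (cs.drop (i+1)) hclose]
      by_cases hf : PySem.Chars.find (cs.drop (i+1)) ['}'] = -1
      · simp [hf]
      · have := PySem.Chars.neg_one_le_find (cs.drop (i+1)) ['}']
        rw [if_neg hf, if_neg (by omega), if_neg hf]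
        push_cast; ring_nf
  · -- past the end: empty range, empty drop
    rw [PySem.List.pyRange_one_eq_nil (by exact_mod_cast Nat.le_of_not_lt hlen),
      List.drop_eq_nil_of_le (Nat.le_of_not_lt hlen)]
    simp [pvA_loop, PySem.Chars.find, PySem.Chars.find.go]
termination_by cs.length - i
decreasing_by omega

-- ===== VERDICT (by name: the statement is the Claim_ definition above) =====
theorem last_brace_object_span_py_spec : Claim_equal_last_brace_object_span_py := by
  intro s _
  unfold Spec_last_brace_object_span_py last_brace_object_span_py last_brace_object_span_py_alt
  have hob : ("{" : String).toList = ['{'] := rfl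
  have hcb : ("}" : String).toList = ['}'] := rfl
  simp only [PySem.Str.rfind_eq, PySem.Str.findFrom_eq, PySem.Str.len_eq, hob, hcb]
  set cs := s.toList with hcs
  rcases pv_rfind_char_spec cs '{' with ⟨h1, _⟩ | ⟨j, hj1, hj2, hj3⟩
  · rw [h1]; norm_num
  · rw [hj1, if_neg (by omega)]
    obtain ⟨hjlen, hjval⟩ := List.getElem?_eq_some_iff.mp hj2
    -- A side: first step consumes the '{' at j
    rw [PySem.List.pyRange_one_cons (by exact_mod_cast hjlen)]
    have hget : PySem.List.pyGetD cs (j : Int) ' ' = cs[j] := by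
      rw [PySem.List.pyGetD_natCast, List.getD_eq_getElem?_getD, List.getElem?_eq_getElem hjlen]
      rfl
    rw [show pvA_loop cs (j : Int) 0 ((j : Int) :: PySem.List.pyRange ((j : Int) + 1) (cs.length : Int) 1) =
        if PySem.List.pyGetD cs (j : Int) ' ' = '{' then
          pvA_loop cs (j : Int) 1 (PySem.List.pyRange ((j : Int) + 1) (cs.length : Int) 1)
        else if PySem.List.pyGetD cs (j : Int) ' ' = '}' then
          if (0 : Int) - 1 = 0 then some ((j : Int), (j : Int) + 1)
          else pvA_loop cs (j : Int) (-1) (PySem.List.pyRange ((j : Int) + 1) (cs.length : Int) 1)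
        else pvA_loop cs (j : Int) 0 (PySem.List.pyRange ((j : Int) + 1) (cs.length : Int) 1) by
        simp [pvA_loop]]
    rw [if_pos (by rw [hget]; exact hjval)]
    have hstep : (j : Int) + 1 = ((j + 1 : Nat) : Int) := by push_cast; ring
    rw [hstep, pv_loopA_after cs (j : Int) (j+1) (fun m hm => hj3 m (by omega))]
    -- B side: findFrom from j; the character at j is '{' ≠ '}'
    rw [PySem.Chars.findFrom_natCast cs ['}'] j (Nat.le_of_lt hjlen)]
    have hdropj : cs.drop j = '{' :: cs.drop (j+1) := by
      rw [List.drop_eq_getElem_cons hjlen, hjval]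
    rw [hdropj, pv_find_cons_of_ne (cs.drop (j+1)) (by decide)]
    by_cases hfeq : PySem.Chars.find (cs.drop (j+1)) ['}'] = -1
    · simp [hfeq]
    · have hfge := PySem.Chars.neg_one_le_find (cs.drop (j+1)) ['}']
      rw [if_neg hfeq, if_neg (by omega), if_neg (by omega), if_neg (by omega), if_neg hfeq]
      push_cast; ring_nf
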